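-- pv_equiv track=rewrite | github.com/sieukim/algorithm-programmers | level3/ex07.py | solution
-- ===== SOURCE A (Python) =====
-- def solution(n, s):
--     # 자연수 n개의 합 = s >= n
--     if s < n:
--         return [-1]
--
--     # s // n 값으로 초기화
--     answer = [s // n for _ in range(n)]
--     # s - 현재 원소의 합
--     s = s - sum(answer)
--
--     for i in range(s):
--         answer[i] += 1
--
--     # 오름차순 정렬
--     answer.sort()
--
--     return answer
-- ===== SOURCE B (Python) =====
-- def solution(n, s):
--     if s < n:
--         return [-1]
--     answer = []
--     while n > 0:
--         a = s // n
--         answer.append(a)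
--         s -= a
--         n -= 1
--     return answer
-- ===== Notes on version B (the rewrite author's own statement) =====
-- stated objective: alternative
-- what changed: B builds the answer greedily in one while-loop, emitting floor(remaining_sum / remaining_count) each step, instead of filling a list with s//n, incrementing a prefix element-by-element and sorting.
import Mathlib
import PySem

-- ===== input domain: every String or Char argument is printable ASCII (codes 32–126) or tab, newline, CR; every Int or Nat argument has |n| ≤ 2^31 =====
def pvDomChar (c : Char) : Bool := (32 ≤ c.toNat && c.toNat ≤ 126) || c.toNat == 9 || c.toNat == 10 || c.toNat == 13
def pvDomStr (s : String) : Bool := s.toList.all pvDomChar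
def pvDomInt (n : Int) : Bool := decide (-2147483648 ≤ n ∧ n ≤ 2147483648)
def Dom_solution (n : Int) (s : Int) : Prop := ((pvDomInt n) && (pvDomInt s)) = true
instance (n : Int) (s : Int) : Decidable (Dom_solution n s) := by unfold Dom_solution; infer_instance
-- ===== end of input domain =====

-- B builds the list greedily in one pass (each element is the floor division of the remaining
-- sum by the remaining count), so no prefix-increment pass and no sort; objective: alternative.

-- ===== PORT A =====
def solution (n : Int) (s : Int) : List Int :=
  if s < n then [-1]
  else
    let answer := (PySem.List.pyRange 0 n 1).map (fun _ => PySem.Int.floordiv s n)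
    let s2 := s - answer.sum
    -- answer[i] += 1 ported as List.modify; exact since Pre_ keeps every i in range
    let answer2 := (PySem.List.pyRange 0 s2 1).foldl
      (fun acc i => acc.modify i.toNat (· + 1)) answer
    PySem.List.sorted answer2 (fun x => x) false

-- ===== PORT B =====
-- the 'while n > 0' loop of Source B, with its 'answer' accumulator
def solutionAltLoop (n : Int) (s : Int) (answer : List Int) : List Int :=
  if 0 < n then
    let a := PySem.Int.floordiv s n
    solutionAltLoop (n - 1) (s - a) (answer ++ [a])
  else answer
termination_by n.toNat
decreasing_by omega

def solution_alt (n : Int) (s : Int) : List Int :=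
  if s < n then [-1]
  else solutionAltLoop n s []

-- ===== PRECONDITION & SPEC =====
-- Pre_ excludes exactly n ≤ 0 with 0 < s, the inputs on which A raises IndexError
-- (the prefix-increment loop indexes into an empty/too-short list).
def Pre_solution (n : Int) (s : Int) : Prop := ¬(n ≤ 0 ∧ 0 < s)
instance (n : Int) (s : Int) : Decidable (Pre_solution n s) := by unfold Pre_solution; infer_instance
def pvWitness_solution : Int × Int := (3, 7)

def Spec_solution (n : Int) (s : Int) (out : List Int) : Prop := out = solution_alt n s
instance (n : Int) (s : Int) (out : List Int) : Decidable (Spec_solution n s out) := by unfold Spec_solution; infer_instance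

-- ===== CLAIM (what is proved, stated in full; the proofs are below) =====
def Claim_equal_solution : Prop := ∀ (n : Int) (s : Int), Dom_solution n s → Pre_solution n s → Spec_solution n s (solution n s)

-- ===== LEMMAS AND PROOFS =====

theorem pv_pyRange_nonpos (a : Int) (h : a ≤ 0) : PySem.List.pyRange 0 a 1 = [] := by
  simp [PySem.List.pyRange]; omega

theorem pv_modify_append (l1 l2 : List Int) (f : Int → Int) (k : Nat) (hk : k = l1.length) :
    (l1 ++ l2).modify k f = l1 ++ l2.modify 0 f := by
  subst hk
  induction l1 with
  | nil => simp
  | cons a t ih => simp only [List.cons_append, List.length_cons, List.modify_succ_cons, ih]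

theorem pv_map_const (N : Nat) (q : Int) :
    (PySem.List.pyRange 0 (N:Int) 1).map (fun _ => q) = List.replicate N q := by
  simp [PySem.List.pyRange_zero_natCast, List.map_map, Function.comp_def, List.map_const']

theorem pv_fold_inc (q : Int) (N k : Nat) (hk : k ≤ N) :
    (PySem.List.pyRange 0 (k:Int) 1).foldl (fun acc i => acc.modify i.toNat (· + 1))
      (List.replicate N q)
    = List.replicate k (q+1) ++ List.replicate (N-k) q := by
  induction k with
  | zero => simp [pv_pyRange_nonpos 0 le_rfl]
  | succ m ih =>
    have hm : m ≤ N := Nat.le_of_succ_le hk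
    have hrange : PySem.List.pyRange 0 ((m:Int) + 1) 1
        = PySem.List.pyRange 0 (m:Int) 1 ++ [(m:Int)] :=
      PySem.List.pyRange_one_succ_right (by positivity)
    have hcast : ((m+1 : Nat) : Int) = (m:Int) + 1 := by push_cast; ring
    rw [hcast, hrange, List.foldl_append, ih hm]
    have hpos : 0 < N - m := by omega
    have hrep : List.replicate (N - m) q = q :: List.replicate (N - m - 1) q := by
      have h1 : N - m = (N - m - 1) + 1 := by omega
      conv_lhs => rw [h1]
      rw [List.replicate_succ]
    simp only [List.foldl_cons, List.foldl_nil, Int.toNat_natCast]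
    rw [hrep, pv_modify_append _ _ _ m (by simp)]
    simp only [List.modify_zero_cons]
    have hNm : N - (m + 1) = N - m - 1 := by omega
    rw [List.replicate_succ' (n := m) (a := q+1), hNm, List.append_assoc]
    simp

-- A equals the balanced ascending list in replicate form
theorem pv_A_repl (n s : Int) (hn : 0 < n) (hs : ¬ s < n) :
    solution n s
      = List.replicate (n - PySem.Int.mod s n).toNat (PySem.Int.floordiv s n)
        ++ List.replicate (PySem.Int.mod s n).toNat (PySem.Int.floordiv s n + 1) := by
  have hn0 : n ≠ 0 := by omega
  set q := PySem.Int.floordiv s n with hq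
  set r := PySem.Int.mod s n with hr
  have hmod : r = s % n := PySem.Int.mod_eq_emod_of_pos hn
  have hr0 : 0 ≤ r := by rw [hmod]; exact Int.emod_nonneg s hn0
  have hrn : r < n := by rw [hmod]; exact Int.emod_lt_of_pos s hn
  have hqr : q * n + r = s := PySem.Int.floordiv_mul_add_mod s n
  set N := n.toNat with hN
  have hNn : (N : Int) = n := Int.toNat_of_nonneg (le_of_lt hn)
  have hRr : ((r.toNat : Nat) : Int) = r := Int.toNat_of_nonneg hr0
  have hkN : r.toNat ≤ N := by omega
  unfold solution
  rw [if_neg hs]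
  simp only [← hq]
  have h1 : (PySem.List.pyRange 0 n 1).map (fun _ => q) = List.replicate N q := by
    rw [← hNn]; exact pv_map_const N q
  rw [h1]
  have hsum : (List.replicate N q).sum = (N:Int) * q := by
    simp [List.sum_replicate]
  rw [hsum]
  have hs2 : s - (N:Int) * q = r := by rw [hNn, mul_comm]; omega
  rw [hs2, ← hRr, pv_fold_inc q N r.toNat hkN]
  simp only [hRr]
  have hnr : (n - r).toNat = N - r.toNat := by clear hqr; omega
  rw [hnr]
  apply PySem.List.sorted_id_eq_of_perm_of_pairwise
  · exact List.perm_append_comm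
  · rw [List.pairwise_append]
    refine ⟨List.pairwise_replicate.mpr (by simp), List.pairwise_replicate.mpr (by simp), ?_⟩
    intro x hx y hy
    rw [List.eq_of_mem_replicate hx, List.eq_of_mem_replicate hy]
    omega

theorem pv_loop_nonpos (n s : Int) (acc : List Int) (h : n ≤ 0) :
    solutionAltLoop n s acc = acc := by
  unfold solutionAltLoop; rw [if_neg (by omega)]

-- B's greedy loop produces the same replicate form
theorem pv_loop_repl (N : Nat) : ∀ (s : Int) (acc : List Int),
    solutionAltLoop ((N:Int) + 1) s acc
      = acc ++ List.replicate (((N:Int) + 1 - PySem.Int.mod s ((N:Int)+1)).toNat)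
                 (PySem.Int.floordiv s ((N:Int)+1))
            ++ List.replicate ((PySem.Int.mod s ((N:Int)+1)).toNat)
                 (PySem.Int.floordiv s ((N:Int)+1) + 1) := by
  induction N with
  | zero =>
    intro s acc
    have hq : PySem.Int.floordiv s 1 = s := by
      rw [PySem.Int.floordiv_eq_ediv_of_pos (by omega)]; simp
    have hr : PySem.Int.mod s 1 = 0 := by
      rw [PySem.Int.mod_eq_emod_of_pos (by omega)]; simp
    simp only [Nat.cast_zero, zero_add]
    conv_lhs => rw [solutionAltLoop]
    rw [if_pos (by omega : (0:Int) < 1)]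
    simp only [hq, hr]
    rw [pv_loop_nonpos _ _ _ (by omega)]
    simp
  | succ M ih =>
    intro s acc
    have hcastn : (((M+1 : Nat)):Int) + 1 = (M:Int) + 1 + 1 := by push_cast; ring
    rw [hcastn]
    set n : Int := (M:Int) + 1 + 1 with hn
    have hnpos : (0:Int) < n := by omega
    set q := PySem.Int.floordiv s n with hq
    set r := PySem.Int.mod s n with hr
    have hmod : r = s % n := PySem.Int.mod_eq_emod_of_pos hnpos
    have hr0 : 0 ≤ r := by rw [hmod]; exact Int.emod_nonneg s (by omega)
    have hrn : r < n := by rw [hmod]; exact Int.emod_lt_of_pos s hnpos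
    have hqr : q * n + r = s := PySem.Int.floordiv_mul_add_mod s n
    have hstep : solutionAltLoop n s acc = solutionAltLoop (n - 1) (s - q) (acc ++ [q]) := by
      conv_lhs => rw [solutionAltLoop]
      rw [if_pos hnpos]
    have hn1 : n - 1 = (M:Int) + 1 := by omega
    have hsq : s - q = q * ((M:Int) + 1) + r := by
      have hx : q * n = q * ((M:Int)+1) + q := by rw [hn]; ring
      omega
    rw [hstep, hn1]
    by_cases hcase : r ≤ (M:Int)
    · -- tail quotient is still q, tail remainder still r
      have hq' : PySem.Int.floordiv (s - q) ((M:Int)+1) = q := by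
        rw [PySem.Int.floordiv_eq_iff_of_pos (by omega)]
        have hx : (q+1) * ((M:Int)+1) = q * ((M:Int)+1) + ((M:Int)+1) := by ring
        constructor <;> [linarith [hsq]; linarith [hsq, hx]]
      have hr' : PySem.Int.mod (s - q) ((M:Int)+1) = r := by
        have h2 := PySem.Int.floordiv_mul_add_mod (s - q) ((M:Int)+1)
        rw [hq'] at h2
        linarith [hsq]
      rw [ih (s - q) (acc ++ [q]), hq', hr']
      have hk : (n - r).toNat = (((M:Int)+1 - r).toNat) + 1 := by omega
      rw [hk, List.replicate_succ]
      simp [List.append_assoc]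
    · -- r = M+1: tail quotient becomes q+1, remainder 0
      have hreq : r = (M:Int) + 1 := by omega
      have hq' : PySem.Int.floordiv (s - q) ((M:Int)+1) = q + 1 := by
        rw [PySem.Int.floordiv_eq_iff_of_pos (by omega)]
        have hx : (q+1) * ((M:Int)+1) = q * ((M:Int)+1) + ((M:Int)+1) := by ring
        have hy : (q+1+1) * ((M:Int)+1) = q * ((M:Int)+1) + 2*((M:Int)+1) := by ring
        constructor <;> [linarith [hsq, hx]; linarith [hsq, hy]]
      have hr' : PySem.Int.mod (s - q) ((M:Int)+1) = 0 := by
        have h2 := PySem.Int.floordiv_mul_add_mod (s - q) ((M:Int)+1)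
        rw [hq'] at h2
        have hx : (q+1) * ((M:Int)+1) = q * ((M:Int)+1) + ((M:Int)+1) := by ring
        linarith [hsq]
      rw [ih (s - q) (acc ++ [q]), hq', hr']
      have h1 : (n - r).toNat = 1 := by omega
      have h2 : r.toNat = M + 1 := by omega
      have h3 : (((M:Int)+1) - 0).toNat = M + 1 := by omega
      rw [h1, h2, h3]
      simp [List.append_assoc]

-- B equals the same replicate form
theorem pv_B_repl (n s : Int) (hn : 0 < n) (hs : ¬ s < n) :
    solution_alt n s
      = List.replicate (n - PySem.Int.mod s n).toNat (PySem.Int.floordiv s n)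
        ++ List.replicate (PySem.Int.mod s n).toNat (PySem.Int.floordiv s n + 1) := by
  unfold solution_alt
  rw [if_neg hs]
  have h := pv_loop_repl (n.toNat - 1) s []
  have hcast : (((n.toNat - 1 : Nat)):Int) + 1 = n := by omega
  rw [hcast] at h
  rw [h]
  simp

-- n ≤ 0 with s ≤ 0: both sides return []
theorem pv_neg (n s : Int) (hn : n ≤ 0) (hs0 : s ≤ 0) (hs : ¬ s < n) :
    solution n s = solution_alt n s := by
  unfold solution solution_alt
  rw [if_neg hs, if_neg hs, pv_pyRange_nonpos n hn]
  simp only [List.map_nil, List.sum_nil, Int.sub_zero]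
  rw [pv_pyRange_nonpos s hs0]
  simp only [List.foldl_nil]
  rw [pv_loop_nonpos n s [] hn]
  simp [PySem.List.sorted]

-- ===== VERDICT (by name: the statements are the Claim_ definitions above) =====
theorem solution_spec : Claim_equal_solution := by
  intro n s _ hpre
  unfold Spec_solution
  by_cases hs : s < n
  · unfold solution solution_alt
    rw [if_pos hs, if_pos hs]
  · by_cases hn : 0 < n
    · rw [pv_A_repl n s hn hs, pv_B_repl n s hn hs]
    · have hs0 : s ≤ 0 := by
        unfold Pre_solution at hpre
        by_contra h
        exact hpre ⟨by omega, by omega⟩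
      exact pv_neg n s (by omega) hs0 hs
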